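-- pv_equiv track=rewrite | github.com/airenas/audio-data-preparation | data_prep/mlf_to_durations.py | update_durations
-- ===== SOURCE A (Python) =====
-- def update_durations(durations, df):
--     if df > 0:
--         durations[-1] += df
--     else:
--         i = len(durations) - 1
--         while df < 0 <= i:
--             v = durations[i]
--             if v + df < 0:
--                 durations[i] = 0
--                 df += v
--             else:
--                 durations[i] += df
--                 df = 0
--             i -= 1
--     return durations
-- ===== SOURCE B (Python) =====
-- def update_durations(durations, df):
--     if df > 0:
--         durations[-1] += df
--     elif df < 0:
--         rem = -df
--         # read-only backward pass: find cutoff index k and the total acc consumed after it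
--         acc = 0
--         k = -1
--         for i in range(len(durations) - 1, -1, -1):
--             if acc + durations[i] >= rem:
--                 k = i
--                 break
--             acc += durations[i]
--         # bulk writes
--         if k >= 0:
--             n = len(durations)
--             durations[k] -= rem - acc
--             durations[k + 1:] = [0] * (n - 1 - k)
--         else:
--             durations[:] = [0] * len(durations)
--     return durations
-- ===== Notes on version B (the rewrite author's own statement) =====
-- stated objective: alternative
-- what changed: A interleaves reading and writing in one backward while-loop that mutates each element as it goes; B first does a read-only backward scan to find the cutoff index and the amount consumed, then performs the writes in bulk (one element update plus a block of zeros).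
import Mathlib
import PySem

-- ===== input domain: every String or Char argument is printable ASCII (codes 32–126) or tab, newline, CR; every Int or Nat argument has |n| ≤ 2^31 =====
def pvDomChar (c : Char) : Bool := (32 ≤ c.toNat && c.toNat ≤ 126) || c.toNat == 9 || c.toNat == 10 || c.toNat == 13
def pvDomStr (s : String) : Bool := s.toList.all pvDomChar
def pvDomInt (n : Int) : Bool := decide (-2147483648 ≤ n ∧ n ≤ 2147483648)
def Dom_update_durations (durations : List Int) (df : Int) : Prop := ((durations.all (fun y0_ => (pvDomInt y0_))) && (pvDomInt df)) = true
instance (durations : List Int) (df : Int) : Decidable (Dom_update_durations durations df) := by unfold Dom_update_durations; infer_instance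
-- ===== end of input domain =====

-- B replaces A's interleaved read/modify backward while-loop by a read-only backward
-- scan that finds the cutoff index, followed by bulk writes (same decomposition of the
-- deficit); both mutate the list in place in Python and end with the same list state.

-- ===== PORT A =====
-- the while loop of A: state (durations, i, df), i counts down
def aLoop (durations : List Int) (i : Int) (df : Int) : List Int :=
  if h : df < 0 ∧ 0 ≤ i then
    let v := durations.getD i.toNat 0
    if v + df < 0 then
      aLoop (durations.set i.toNat 0) (i - 1) (df + v)
    else
      aLoop (durations.set i.toNat (v + df)) (i - 1) 0
  else durations
termination_by (i + 1).toNat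
decreasing_by all_goals omega

def update_durations (durations : List Int) (df : Int) : List Int :=
  if df > 0 then
    -- durations[-1] += df ; Pre_ excludes the empty list here (IndexError)
    durations.set (durations.length - 1) (durations.getD (durations.length - 1) 0 + df)
  else
    aLoop durations ((durations.length : Int) - 1) df

-- ===== PORT B =====
-- read-only backward scan: j = number of indices still to look at (indices 0..j-1);
-- returns (cutoff index, accumulated total of the elements after it), or none
def bScan (durations : List Int) (j : Nat) (acc rem : Int) : Option (Nat × Int) :=
  match j with
  | 0 => none
  | j' + 1 =>
    let v := durations.getD j' 0
    if acc + v ≥ rem then some (j', acc) else bScan durations j' (acc + v) rem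

def update_durations_alt (durations : List Int) (df : Int) : List Int :=
  if df > 0 then
    durations.set (durations.length - 1) (durations.getD (durations.length - 1) 0 + df)
  else if df < 0 then
    let rem := -df
    match bScan durations durations.length 0 rem with
    | some (k, acc) =>
      durations.take k ++ [durations.getD k 0 - (rem - acc)]
        ++ List.replicate (durations.length - 1 - k) 0
    | none => List.replicate durations.length 0
  else durations

-- ===== PRECONDITION & SPEC =====
-- Pre_ excludes exactly the inputs where Python A raises IndexError: empty list with df > 0
def Pre_update_durations (durations : List Int) (df : Int) : Prop :=
  durations ≠ [] ∨ df ≤ 0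
instance (durations : List Int) (df : Int) : Decidable (Pre_update_durations durations df) := by
  unfold Pre_update_durations; infer_instance

def pvWitness_update_durations : List Int × Int := ([3, 1, 4], -2)

def Spec_update_durations (durations : List Int) (df : Int) (out : List Int) : Prop := out = update_durations_alt durations df
instance (durations : List Int) (df : Int) (out : List Int) : Decidable (Spec_update_durations durations df out) := by unfold Spec_update_durations; infer_instance

-- ===== CLAIM (what is proved, stated in full; the proofs are below) =====
def Claim_equal_update_durations : Prop := ∀ (durations : List Int) (df : Int), Dom_update_durations durations df → Pre_update_durations durations df → Spec_update_durations durations df (update_durations durations df)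

-- ===== LEMMAS AND PROOFS =====

-- the cutoff index returned by the scan is below the scan bound
theorem bScan_lt (durations : List Int) (j : Nat) (acc rem : Int) (k : Nat) (a : Int)
    (h : bScan durations j acc rem = some (k, a)) : k < j := by
  induction j generalizing acc with
  | zero => simp [bScan] at h
  | succ j' ih =>
    simp only [bScan] at h
    split at h
    · simp_all
    · exact Nat.lt_succ_of_lt (ih _ h)

-- the scan only depends on the list entries below the bound and on rem - acc
theorem bScan_shift (l l' : List Int) (j : Nat) (acc acc' rem rem' : Int)
    (hag : ∀ i, i < j → l.getD i 0 = l'.getD i 0)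
    (h : rem - acc = rem' - acc') :
    bScan l j acc rem = (bScan l' j acc' rem').map (fun p => (p.1, p.2 + (acc - acc'))) := by
  induction j generalizing acc acc' with
  | zero => simp [bScan]
  | succ j' ih =>
    have hv : l.getD j' 0 = l'.getD j' 0 := hag j' (Nat.lt_succ_self j')
    simp only [bScan, hv]
    have hceq : (rem ≤ acc + l'.getD j' 0) ↔ (rem' ≤ acc' + l'.getD j' 0) := by
      constructor <;> intro hx <;> omega
    by_cases hc : acc' + l'.getD j' 0 ≥ rem'
    · rw [if_pos hc, if_pos (hceq.mpr hc)]
      simp only [Option.map_some, Option.some.injEq, Prod.mk.injEq]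
      exact ⟨trivial, by ring⟩
    · rw [if_neg hc, if_neg (fun hx => hc (hceq.mp hx))]
      have h2 := ih (acc + l'.getD j' 0) (acc' + l'.getD j' 0)
        (fun i hi => hag i (Nat.lt_succ_of_lt hi)) (by omega)
      simpa [show acc + l'.getD j' 0 - (acc' + l'.getD j' 0) = acc - acc' by ring] using h2

theorem drop_set_zero (l : List Int) (n : Nat) (hn : n < l.length) :
    (l.set n 0).drop n = 0 :: l.drop (n + 1) := by
  have h1 : (l.set n 0).drop n = (l.drop n).set 0 0 := by
    rw [List.drop_set]
    simp
  have h2 : l.drop n = l[n] :: l.drop (n + 1) := List.drop_eq_getElem_cons (by simpa using hn)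
  rw [h1, h2]
  rfl

-- main invariant: A's loop over indices 0..n-1 equals B's find-then-write reconstruction
theorem aLoop_eq (n : Nat) : ∀ (l : List Int) (df : Int), df < 0 → n ≤ l.length →
    aLoop l ((n : Int) - 1) df =
      (match bScan l n 0 (-df) with
       | some (k, acc) =>
         l.take k ++ [l.getD k 0 - (-df - acc)] ++ List.replicate (n - 1 - k) 0 ++ l.drop n
       | none => List.replicate n 0 ++ l.drop n) := by
  induction n with
  | zero =>
    intro l df hdf _
    rw [aLoop]
    simp [bScan]
  | succ n ih =>
    intro l df hdf hlen
    have hn : n < l.length := hlen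
    rw [show (((n + 1 : Nat) : Int) - 1) = ((n : Nat) : Int) by push_cast; ring]
    rw [aLoop]
    rw [dif_pos ⟨hdf, by omega⟩]
    simp only [Int.toNat_natCast]
    by_cases hc : l.getD n 0 + df < 0
    · -- element n fully consumed: A recurses with list l.set n 0 and deficit df + v
      rw [if_pos hc]
      rw [ih (l.set n 0) (df + l.getD n 0) (by omega) (by simpa using hn.le)]
      -- relate bScan on l (bound n+1) with bScan on l.set n 0 (bound n)
      have hstep : bScan l (n + 1) 0 (-df) = bScan l n (l.getD n 0) (-df) := by
        simp only [bScan]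
        rw [if_neg (by omega)]
        simp
      have hsh : bScan l n (l.getD n 0) (-df) =
          (bScan (l.set n 0) n 0 (-(df + l.getD n 0))).map
            (fun p => (p.1, p.2 + l.getD n 0)) := by
        have hag : ∀ i, i < n → l.getD i 0 = (l.set n 0).getD i 0 := by
          intro i hi
          rw [List.getD, List.getD, List.getElem?_set_ne (by omega)]
        simpa using bScan_shift l (l.set n 0) n (l.getD n 0) 0 (-df)
          (-(df + l.getD n 0)) hag (by ring)
      rw [hstep, hsh]
      cases hb : bScan (l.set n 0) n 0 (-(df + l.getD n 0)) with
      | none =>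
        simp only [Option.map_none]
        rw [drop_set_zero l n hn]
        rw [show n + 1 = n + 1 from rfl]
        simp [List.replicate_succ' (n := n)]
      | some p =>
        obtain ⟨k, a⟩ := p
        have hk : k < n := bScan_lt _ _ _ _ _ _ hb
        simp only [Option.map_some]
        have ht : (l.set n 0).take k = l.take k := by
          rw [List.take_set_of_le (by omega)]
        have hg : (l.set n 0).getD k 0 = l.getD k 0 := by
          rw [List.getD, List.getD, List.getElem?_set_ne (by omega)]
        rw [ht, hg, drop_set_zero l n hn]
        have harith : -(df + l.getD n 0) - a = -df - (a + l.getD n 0) := by ring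
        rw [harith]
        have hrep : List.replicate (n - 1 - k) (0 : Int) ++ 0 :: l.drop (n + 1)
            = List.replicate (n + 1 - 1 - k) 0 ++ l.drop (n + 1) := by
          rw [show n + 1 - 1 - k = (n - 1 - k) + 1 by omega, List.replicate_succ']
          simp
        simp only [List.append_assoc] at hrep ⊢
        rw [hrep]
    · -- element n absorbs the whole deficit: A stops after this write
      rw [if_neg hc]
      rw [aLoop]
      rw [dif_neg (by omega)]
      have hstop : bScan l (n + 1) 0 (-df) = some (n, 0) := by
        simp only [bScan]
        rw [if_pos (by omega)]
      rw [hstop]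
      have hset : l.set n (l.getD n 0 + df)
          = l.take n ++ [l.getD n 0 + df] ++ l.drop (n + 1) := by
        rw [List.set_eq_take_append_cons_drop, if_pos (by simpa using hn)]
        simp
      rw [hset]
      simp only [show l.getD n 0 - (-df - 0) = l.getD n 0 + df by ring, Nat.succ_sub_one,
        Nat.sub_self, List.replicate_zero]
      simp

-- ===== VERDICT (by name: the statement is the Claim_ definition above) =====
theorem update_durations_spec : Claim_equal_update_durations := by
  intro l df _ hpre
  unfold Spec_update_durations update_durations update_durations_alt
  by_cases hpos : df > 0
  · rw [if_pos hpos, if_pos hpos]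
  · rw [if_neg hpos, if_neg hpos]
    by_cases hneg : df < 0
    · rw [if_pos hneg]
      have := aLoop_eq l.length l df hneg le_rfl
      rw [this]
      cases hb : bScan l l.length 0 (-df) with
      | none => simp [hb]
      | some p => obtain ⟨k, a⟩ := p; simp [hb]
    · rw [if_neg hneg]
      rw [aLoop]
      rw [dif_neg (by omega)]
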